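-- pv_equiv track=rewrite | github.com/jsavage/Binder-Jupyter-HCS-DSL | content/startup/00-hcs-processor.py | convert_hcs_to_mermaid
-- ===== SOURCE A (Python) =====
-- def convert_hcs_to_mermaid(hcs_input):
--     mermaid_lines = ['graph TD', 'linkStyle default interpolate basis']
--     feedback_count = 0
--     total_links = 0
--
--     # Extract subgraph components from DSL
--     for line in hcs_input.splitlines():
--         if '[' in line and ']' in line:
--             parent, children = line.split('[')
--             children = children.rstrip(']').strip()
--             components = children.split()
--             # Create subgraph
--             mermaid_lines.append(f'subgraph {parent.strip()}')
--             for comp in components: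
--                 mermaid_lines.append(f'    {comp}[{comp}]')
--             mermaid_lines.append('end')
--
--     # Process relationships
--     for line in hcs_input.splitlines():
--         if ':' in line:
--             entities_part, actions = line.split(':', 1)
--             source, target = [e.strip() for e in entities_part.split()]
--             actions = actions.strip()
--             if source == 'Person':
--                 source = 'Person([Person])'
--             if actions:
--                 if '/' in actions:
--                     actions_list, feedback = actions.split('/', 1)
--                     if actions_list.strip():
--                         actions_list = actions_list.strip().split(',')
--                         for action in actions_list:
--                             if action.strip():
--                                 mermaid_lines.append(f'{source}-->|{action.strip()}|{target}')
--                                 total_links += 1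
--                     if feedback.strip():
--                         feedback_list = feedback.strip().split(',')
--                         for fb in feedback_list:
--                             if fb.strip():
--                                 mermaid_lines.append(f'{target}-->|{fb.strip()}|{source}')
--                                 mermaid_lines.append(f'linkStyle {total_links} stroke:#ff0000,color:#ff0000')
--                                 total_links += 1
--                 else:
--                     actions_list = actions.strip().split(',')
--                     for action in actions_list:
--                         if action.strip():
--                             mermaid_lines.append(f'{source}-->|{action.strip()}|{target}')
--                             total_links += 1
--
--     return '\n'.join(mermaid_lines)
-- ===== SOURCE B (Python) =====
-- def convert_hcs_to_mermaid(hcs_input):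
--     # One pass over the lines: collect subgraph lines and structured edge records;
--     # then a render pass numbers the edges globally and emits linkStyle for feedback edges.
--     sub_lines = []
--     edges = []  # (source, target, label, is_feedback)
--     for line in hcs_input.splitlines():
--         if '[' in line and ']' in line:
--             parent, children = line.split('[')
--             sub_lines.append('subgraph ' + parent.strip())
--             for comp in children.rstrip(']').strip().split():
--                 sub_lines.append('    ' + comp + '[' + comp + ']')
--             sub_lines.append('end')
--         if ':' in line:
--             entities, actions = line.split(':', 1)
--             source, target = entities.split()
--             if source == 'Person':
--                 source = 'Person([Person])'
--             actions = actions.strip()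
--             if '/' in actions:
--                 acts, feedback = actions.split('/', 1)
--             else:
--                 acts, feedback = actions, ''
--             for a in acts.strip().split(','):
--                 if a.strip():
--                     edges.append((source, target, a.strip(), False))
--             for fb in feedback.strip().split(','):
--                 if fb.strip():
--                     edges.append((target, source, fb.strip(), True))
--     out = ['graph TD', 'linkStyle default interpolate basis'] + sub_lines
--     for i, (s, t, lbl, fb) in enumerate(edges):
--         out.append(s + '-->|' + lbl + '|' + t)
--         if fb:
--             out.append('linkStyle ' + str(i) + ' stroke:#ff0000,color:#ff0000')
--     return '\n'.join(out)
-- ===== Notes on version B (the rewrite author's own statement) =====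
-- stated objective: alternative
-- what changed: A makes two full passes over the lines, interleaving parsing and output-string emission and threading a link counter; B makes one parsing pass that collects subgraph lines plus structured edge records (source, target, label, is_feedback), then a separate render pass numbers the edges and emits linkStyle lines from the records.
import Mathlib
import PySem

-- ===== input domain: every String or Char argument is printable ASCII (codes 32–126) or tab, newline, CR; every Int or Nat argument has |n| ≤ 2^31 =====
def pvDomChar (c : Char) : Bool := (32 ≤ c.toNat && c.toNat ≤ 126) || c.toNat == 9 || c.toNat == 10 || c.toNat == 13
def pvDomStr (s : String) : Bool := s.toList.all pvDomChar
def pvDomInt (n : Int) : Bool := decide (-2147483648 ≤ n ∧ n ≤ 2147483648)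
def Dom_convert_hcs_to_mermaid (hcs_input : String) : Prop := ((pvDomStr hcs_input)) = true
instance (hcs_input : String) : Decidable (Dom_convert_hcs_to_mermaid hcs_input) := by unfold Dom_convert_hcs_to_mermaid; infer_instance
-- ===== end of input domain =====

-- B restructures A's two output-emitting passes into one parsing pass that collects subgraph
-- lines and structured edge records, plus a separate render pass that numbers the edges;
-- same return value (objective: alternative decomposition, same cost).

-- ===== PORT A =====
-- hand port of str.rstrip(']') (drop trailing ']' characters): exact
def pvRstripBracket (cs : List Char) : List Char :=
  (cs.reverse.dropWhile (· == ']')).reverse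

def pvSubLoopA (acc : List (List Char)) (line : List Char) : List (List Char) :=
  if PySem.Chars.isIn ['['] line && PySem.Chars.isIn [']'] line then
    match PySem.Chars.split? line ['['] with
    | some [parent, children0] =>
      let children := PySem.Chars.strip (pvRstripBracket children0)
      let components := PySem.Chars.split₀ children
      let acc := acc ++ ["subgraph ".toList ++ PySem.Chars.strip parent]
      let acc := components.foldl
        (fun a comp => a ++ ["    ".toList ++ comp ++ ['['] ++ comp ++ [']']]) acc
      acc ++ ["end".toList]
    | _ => acc   -- Python raises ValueError here (unpacking ≠ 2 pieces); excluded by Pre_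
  else acc

def pvRelLoopA (st : List (List Char) × Int) (line : List Char) : List (List Char) × Int :=
  if PySem.Chars.isIn [':'] line then
    match PySem.Chars.splitMax? line [':'] 1 with
    | some [entitiesPart, actions0] =>
      match (PySem.Chars.split₀ entitiesPart).map PySem.Chars.strip with
      | [source0, target] =>
        let source := if source0 = "Person".toList then "Person([Person])".toList else source0
        let actions := PySem.Chars.strip actions0
        if actions ≠ [] then
          if PySem.Chars.isIn ['/'] actions then
            match PySem.Chars.splitMax? actions ['/'] 1 with
            | some [actionsList0, feedback] =>
              let st :=
                if PySem.Chars.strip actionsList0 ≠ [] then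
                  (PySem.Chars.splitOn (PySem.Chars.strip actionsList0) [',']).foldl
                    (fun st action =>
                      if PySem.Chars.strip action ≠ [] then
                        (st.1 ++ [source ++ "-->|".toList ++ PySem.Chars.strip action ++ ['|'] ++ target],
                         st.2 + 1)
                      else st) st
                else st
              if PySem.Chars.strip feedback ≠ [] then
                (PySem.Chars.splitOn (PySem.Chars.strip feedback) [',']).foldl
                  (fun st fb =>
                    if PySem.Chars.strip fb ≠ [] then
                      (st.1 ++ [target ++ "-->|".toList ++ PySem.Chars.strip fb ++ ['|'] ++ source,
                                "linkStyle ".toList ++ PySem.Int.toChars st.2 ++ " stroke:#ff0000,color:#ff0000".toList],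
                       st.2 + 1)
                    else st) st
              else st
            | _ => st   -- unreachable: '/' occurs in actions, the split has two pieces
          else
            (PySem.Chars.splitOn (PySem.Chars.strip actions) [',']).foldl
              (fun st action =>
                if PySem.Chars.strip action ≠ [] then
                  (st.1 ++ [source ++ "-->|".toList ++ PySem.Chars.strip action ++ ['|'] ++ target],
                   st.2 + 1)
                else st) st
        else st
      | _ => st   -- Python raises ValueError here (unpacking ≠ 2 names); excluded by Pre_
    | _ => st
  else st

def convert_hcs_to_mermaid (hcs_input : String) : String :=
  let lines := PySem.Chars.splitlines hcs_input.toList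
  let mermaid0 := ["graph TD".toList, "linkStyle default interpolate basis".toList]
  let mermaid1 := lines.foldl pvSubLoopA mermaid0
  let final := lines.foldl pvRelLoopA (mermaid1, 0)
  String.ofList (PySem.Chars.join ['\n'] final.1)

-- ===== PORT B =====
-- edge record: (source, target, label, is_feedback)
def pvLineB (st : List (List Char) × List (List Char × List Char × List Char × Bool))
    (line : List Char) : List (List Char) × List (List Char × List Char × List Char × Bool) :=
  let st :=
    if PySem.Chars.isIn ['['] line && PySem.Chars.isIn [']'] line then
      match PySem.Chars.split? line ['['] with
      | some [parent, children] =>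
        let subs := st.1 ++ ["subgraph ".toList ++ PySem.Chars.strip parent]
        let subs := (PySem.Chars.split₀ (PySem.Chars.strip (pvRstripBracket children))).foldl
          (fun a comp => a ++ ["    ".toList ++ comp ++ ['['] ++ comp ++ [']']]) subs
        (subs ++ ["end".toList], st.2)
      | _ => st   -- Python raises ValueError here; excluded by Pre_
    else st
  if PySem.Chars.isIn [':'] line then
    match PySem.Chars.splitMax? line [':'] 1 with
    | some [entities, actions0] =>
      match PySem.Chars.split₀ entities with
      | [source0, target] =>
        let source := if source0 = "Person".toList then "Person([Person])".toList else source0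
        let actions := PySem.Chars.strip actions0
        let af : List Char × List Char :=
          if PySem.Chars.isIn ['/'] actions then
            match PySem.Chars.splitMax? actions ['/'] 1 with
            | some [a, b] => (a, b)
            | _ => ([], [])   -- unreachable: '/' occurs in actions, the split has two pieces
          else (actions, [])
        let edges := (PySem.Chars.splitOn (PySem.Chars.strip af.1) [',']).foldl
          (fun es a => if PySem.Chars.strip a ≠ [] then
              es ++ [(source, target, PySem.Chars.strip a, false)] else es) st.2
        let edges := (PySem.Chars.splitOn (PySem.Chars.strip af.2) [',']).foldl
          (fun es fb => if PySem.Chars.strip fb ≠ [] then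
              es ++ [(target, source, PySem.Chars.strip fb, true)] else es) edges
        (st.1, edges)
      | _ => st   -- Python raises ValueError here; excluded by Pre_
    | _ => st
  else st

-- render one edge, threading the running edge index (the port of B's enumerate loop)
def pvRenderStep (st : List (List Char) × Int) (e : List Char × List Char × List Char × Bool) :
    List (List Char) × Int :=
  let out := st.1 ++ [e.1 ++ "-->|".toList ++ e.2.2.1 ++ ['|'] ++ e.2.1]
  let out := if e.2.2.2 then
      out ++ ["linkStyle ".toList ++ PySem.Int.toChars st.2 ++ " stroke:#ff0000,color:#ff0000".toList]
    else out
  (out, st.2 + 1)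

def convert_hcs_to_mermaid_alt (hcs_input : String) : String :=
  let lines := PySem.Chars.splitlines hcs_input.toList
  let parsed := lines.foldl pvLineB ([], [])
  let out0 := ["graph TD".toList, "linkStyle default interpolate basis".toList] ++ parsed.1
  let final := parsed.2.foldl pvRenderStep (out0, 0)
  String.ofList (PySem.Chars.join ['\n'] final.1)

-- ===== PRECONDITION & SPEC =====
-- Pre_ excludes exactly the inputs on which Python A raises ValueError (tuple unpacking):
-- a subgraph line (one holding both kinds of square bracket) with more than one opening
-- bracket, or a relationship line (one holding a colon) whose part before the first colon
-- does not consist of exactly two whitespace-separated tokens; B raises on the same inputs.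
def Pre_convert_hcs_to_mermaid (hcs_input : String) : Prop :=
  ∀ line ∈ PySem.Chars.splitlines hcs_input.toList,
    (PySem.Chars.isIn ['['] line = true → PySem.Chars.isIn [']'] line = true →
      PySem.Chars.count line ['['] = 1) ∧
    (PySem.Chars.isIn [':'] line = true →
      (PySem.Chars.split₀ (line.takeWhile (· != ':'))).length = 2)
instance (hcs_input : String) : Decidable (Pre_convert_hcs_to_mermaid hcs_input) := by
  unfold Pre_convert_hcs_to_mermaid; infer_instance

def pvWitness_convert_hcs_to_mermaid : String := "Sys [A B]\nA B: x, y / fb\nPerson A: go"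

def Spec_convert_hcs_to_mermaid (hcs_input : String) (out : String) : Prop :=
  out = convert_hcs_to_mermaid_alt hcs_input
instance (hcs_input : String) (out : String) : Decidable (Spec_convert_hcs_to_mermaid hcs_input out) := by
  unfold Spec_convert_hcs_to_mermaid; infer_instance

-- ===== CLAIM (what is proved, stated in full; the proofs are below) =====
def Claim_equal_convert_hcs_to_mermaid : Prop := ∀ (hcs_input : String), Dom_convert_hcs_to_mermaid hcs_input → Pre_convert_hcs_to_mermaid hcs_input → Spec_convert_hcs_to_mermaid hcs_input (convert_hcs_to_mermaid hcs_input)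

-- ===== LEMMAS AND PROOFS =====


-- ===== LEMMAS AND PROOFS (helpers below the claim block; used only by the proofs) =====

-- dropWhile of a predicate false on all elements
theorem pv_dropWhile_all_false {α : Type} (p : α → Bool) (l : List α)
    (h : ∀ c ∈ l, p c = false) : l.dropWhile p = l := by
  cases l with
  | nil => rfl
  | cons a l => simp [h a (by simp)]

theorem pv_strip_of_nospace (t : List Char)
    (h : ∀ c ∈ t, PySem.Chars.isspace c = false) : PySem.Chars.strip t = t := by
  unfold PySem.Chars.strip PySem.Chars.lstrip PySem.Chars.rstrip
  rw [pv_dropWhile_all_false _ _ h, pv_dropWhile_all_false, List.reverse_reverse]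
  intro c hc; exact h c (List.mem_reverse.1 hc)

theorem pv_split₀_go_nospace (s : List Char) : ∀ (cur : List Char) (acc : List (List Char)),
    (∀ c ∈ cur, PySem.Chars.isspace c = false) →
    (∀ t ∈ acc, ∀ c ∈ t, PySem.Chars.isspace c = false) →
    ∀ t ∈ PySem.Chars.split₀.go s cur acc, ∀ c ∈ t, PySem.Chars.isspace c = false := by
  induction s with
  | nil =>
    intro cur acc hcur hacc t ht
    by_cases h : cur.isEmpty
    · simp [PySem.Chars.split₀.go, h] at ht
      exact hacc t (by simpa using ht)
    · simp [PySem.Chars.split₀.go, h] at ht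
      rcases (by simpa using ht : t ∈ acc ∨ t = cur.reverse) with h1 | h1
      · exact hacc t h1
      · subst h1; intro c hc; exact hcur c (List.mem_reverse.1 hc)
  | cons c rest ih =>
    intro cur acc hcur hacc t ht
    by_cases hs : PySem.Chars.isspace c
    · by_cases h : cur.isEmpty
      · simp [PySem.Chars.split₀.go, hs, h] at ht
        exact ih [] acc (by simp) hacc t ht
      · simp [PySem.Chars.split₀.go, hs, h] at ht
        refine ih [] (cur.reverse :: acc) (by simp) ?_ t ht
        intro u hu
        rcases List.mem_cons.1 hu with h1 | h1
        · subst h1; intro d hd; exact hcur d (List.mem_reverse.1 hd)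
        · exact hacc u h1
    · simp [PySem.Chars.split₀.go, hs] at ht
      refine ih (c :: cur) acc ?_ hacc t ht
      intro d hd
      rcases List.mem_cons.1 hd with h1 | h1
      · subst h1; simpa using hs
      · exact hcur d h1

theorem pv_split₀_tokens_nospace (e : List Char) :
    ∀ t ∈ PySem.Chars.split₀ e, ∀ c ∈ t, PySem.Chars.isspace c = false := by
  unfold PySem.Chars.split₀
  exact pv_split₀_go_nospace e [] [] (by simp) (by simp)

theorem pv_map_strip_split₀ (e : List Char) :
    (PySem.Chars.split₀ e).map PySem.Chars.strip = PySem.Chars.split₀ e := by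
  rw [show PySem.Chars.split₀ e = (PySem.Chars.split₀ e).map id by simp]
  rw [List.map_map]
  refine List.map_congr_left ?_
  intro t ht
  simp only [Function.comp, id]
  exact pv_strip_of_nospace t (pv_split₀_tokens_nospace e t (by simpa using ht))


-- per-line contribution of the subgraph branch
def pvSubOf (line : List Char) : List (List Char) :=
  if PySem.Chars.isIn ['['] line && PySem.Chars.isIn [']'] line then
    match PySem.Chars.split? line ['['] with
    | some [parent, children] =>
      ["subgraph ".toList ++ PySem.Chars.strip parent]
        ++ (PySem.Chars.split₀ (PySem.Chars.strip (pvRstripBracket children))).map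
            (fun comp => "    ".toList ++ comp ++ ['['] ++ comp ++ [']'])
        ++ ["end".toList]
    | _ => []
  else []

def pvFwdEdges (source target : List Char) (l : List (List Char)) :
    List (List Char × List Char × List Char × Bool) :=
  l.filterMap (fun a => if PySem.Chars.strip a ≠ [] then
    some (source, target, PySem.Chars.strip a, false) else none)

def pvFbEdges (target source : List Char) (l : List (List Char)) :
    List (List Char × List Char × List Char × Bool) :=
  l.filterMap (fun fb => if PySem.Chars.strip fb ≠ [] then
    some (target, source, PySem.Chars.strip fb, true) else none)

-- per-line contribution of the relationship branch, as edge records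
def pvEdgesOf (line : List Char) : List (List Char × List Char × List Char × Bool) :=
  if PySem.Chars.isIn [':'] line then
    match PySem.Chars.splitMax? line [':'] 1 with
    | some [entities, actions0] =>
      match PySem.Chars.split₀ entities with
      | [source0, target] =>
        let source := if source0 = "Person".toList then "Person([Person])".toList else source0
        let actions := PySem.Chars.strip actions0
        let af : List Char × List Char :=
          if PySem.Chars.isIn ['/'] actions then
            match PySem.Chars.splitMax? actions ['/'] 1 with
            | some [a, b] => (a, b)
            | _ => ([], [])
          else (actions, [])
        pvFwdEdges source target (PySem.Chars.splitOn (PySem.Chars.strip af.1) [','])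
          ++ pvFbEdges target source (PySem.Chars.splitOn (PySem.Chars.strip af.2) [','])
      | _ => []
    | _ => []
  else []

-- rendering of an edge list starting at link index t
def pvRenderFrom : Int → List (List Char × List Char × List Char × Bool) → List (List Char)
  | _, [] => []
  | t, e :: es =>
    (e.1 ++ "-->|".toList ++ e.2.2.1 ++ ['|'] ++ e.2.1) ::
      ((if e.2.2.2 then
          ["linkStyle ".toList ++ PySem.Int.toChars t ++ " stroke:#ff0000,color:#ff0000".toList]
        else []) ++ pvRenderFrom (t + 1) es)

theorem pv_renderFrom_append (E F : List (List Char × List Char × List Char × Bool)) :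
    ∀ t : Int, pvRenderFrom t (E ++ F) = pvRenderFrom t E ++ pvRenderFrom (t + E.length) F := by
  induction E with
  | nil => intro t; simp [pvRenderFrom]
  | cons e E ih =>
    intro t
    have harith : t + 1 + (E.length : Int) = t + ((E.length : Int) + 1) := by ring
    simp [pvRenderFrom, ih (t + 1), List.append_assoc, harith]

theorem pv_subLoopA_eq (acc : List (List Char)) (line : List Char) :
    pvSubLoopA acc line = acc ++ pvSubOf line := by
  unfold pvSubLoopA pvSubOf
  by_cases h : (PySem.Chars.isIn ['['] line && PySem.Chars.isIn [']'] line) = true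
  · simp only [h, if_true]
    rcases hsp : PySem.Chars.split? line ['['] with _ | ⟨_ | ⟨p, _ | ⟨c, _ | ⟨x, r⟩⟩⟩⟩
    · simp
    · simp
    · simp
    · dsimp only
      rw [PySem.List.foldl_append_singleton_eq_map]
      simp [List.append_assoc]
    · simp
  · simp [h]

theorem pv_foldB_fwd (source target : List Char) (l : List (List Char)) :
    ∀ es, l.foldl (fun es a => if PySem.Chars.strip a ≠ [] then
        es ++ [(source, target, PySem.Chars.strip a, false)] else es) es
      = es ++ pvFwdEdges source target l := by
  induction l with
  | nil => intro es; simp [pvFwdEdges]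
  | cons a l ih =>
    intro es
    rw [List.foldl_cons]
    by_cases h : PySem.Chars.strip a ≠ []
    · rw [if_pos h, ih]
      simp [pvFwdEdges, List.filterMap_cons, h]
    · rw [if_neg h, ih]
      simp only [ne_eq, not_not] at h
      simp [pvFwdEdges, List.filterMap_cons, h]

theorem pv_foldB_fb (target source : List Char) (l : List (List Char)) :
    ∀ es, l.foldl (fun es fb => if PySem.Chars.strip fb ≠ [] then
        es ++ [(target, source, PySem.Chars.strip fb, true)] else es) es
      = es ++ pvFbEdges target source l := by
  induction l with
  | nil => intro es; simp [pvFbEdges]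
  | cons a l ih =>
    intro es
    rw [List.foldl_cons]
    by_cases h : PySem.Chars.strip a ≠ []
    · rw [if_pos h, ih]
      simp [pvFbEdges, List.filterMap_cons, h]
    · rw [if_neg h, ih]
      simp only [ne_eq, not_not] at h
      simp [pvFbEdges, List.filterMap_cons, h]

theorem pv_foldA_fwd (source target : List Char) (l : List (List Char)) :
    ∀ (acc : List (List Char)) (t : Int),
      l.foldl (fun st action => if PySem.Chars.strip action ≠ [] then
          (st.1 ++ [source ++ "-->|".toList ++ PySem.Chars.strip action ++ ['|'] ++ target], st.2 + 1)
        else st) (acc, t)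
      = (acc ++ pvRenderFrom t (pvFwdEdges source target l),
         t + ((pvFwdEdges source target l).length : Int)) := by
  induction l with
  | nil => intro acc t; simp [pvFwdEdges, pvRenderFrom]
  | cons a l ih =>
    intro acc t
    by_cases h : PySem.Chars.strip a ≠ []
    · simp only [List.foldl_cons, if_pos h, ih]
      have he : pvFwdEdges source target (a :: l)
          = (source, target, PySem.Chars.strip a, false) :: pvFwdEdges source target l := by
        simp [pvFwdEdges, List.filterMap_cons, h]
      rw [he]
      simp [pvRenderFrom, List.append_assoc]
      push_cast; ring
    · simp only [List.foldl_cons, if_neg h, ih]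
      have he : pvFwdEdges source target (a :: l) = pvFwdEdges source target l := by
        simp [pvFwdEdges, List.filterMap_cons, h]
      rw [he]

theorem pv_foldA_fb (target source : List Char) (l : List (List Char)) :
    ∀ (acc : List (List Char)) (t : Int),
      l.foldl (fun st fb => if PySem.Chars.strip fb ≠ [] then
          (st.1 ++ [target ++ "-->|".toList ++ PySem.Chars.strip fb ++ ['|'] ++ source,
                    "linkStyle ".toList ++ PySem.Int.toChars st.2 ++ " stroke:#ff0000,color:#ff0000".toList],
           st.2 + 1)
        else st) (acc, t)
      = (acc ++ pvRenderFrom t (pvFbEdges target source l),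
         t + ((pvFbEdges target source l).length : Int)) := by
  induction l with
  | nil => intro acc t; simp [pvFbEdges, pvRenderFrom]
  | cons a l ih =>
    intro acc t
    by_cases h : PySem.Chars.strip a ≠ []
    · simp only [List.foldl_cons, if_pos h, ih]
      have he : pvFbEdges target source (a :: l)
          = (target, source, PySem.Chars.strip a, true) :: pvFbEdges target source l := by
        simp [pvFbEdges, List.filterMap_cons, h]
      rw [he]
      simp [pvRenderFrom, List.append_assoc]
      push_cast; ring
    · simp only [List.foldl_cons, if_neg h, ih]
      have he : pvFbEdges target source (a :: l) = pvFbEdges target source l := by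
        simp [pvFbEdges, List.filterMap_cons, h]
      rw [he]

theorem pv_relLoopA_eq (acc : List (List Char)) (t : Int) (line : List Char) :
    pvRelLoopA (acc, t) line
      = (acc ++ pvRenderFrom t (pvEdgesOf line), t + ((pvEdgesOf line).length : Int)) := by
  have hstr0 : PySem.Chars.strip ([] : List Char) = [] := rfl
  have h0 : PySem.Chars.splitOn [] [','] = [[]] := rfl
  have hsl0 : PySem.Chars.isIn ['/'] [] = false := rfl
  unfold pvRelLoopA pvEdgesOf
  by_cases hc : PySem.Chars.isIn [':'] line = true
  · simp only [hc, if_true]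
    rcases hsp : PySem.Chars.splitMax? line [':'] 1 with _ | ⟨_ | ⟨ent, _ | ⟨act0, _ | ⟨x, r⟩⟩⟩⟩
    · simp [pvRenderFrom]
    · simp [pvRenderFrom]
    · simp [pvRenderFrom]
    · dsimp only
      rw [pv_map_strip_split₀]
      rcases hsq : PySem.Chars.split₀ ent with _ | ⟨s0, _ | ⟨tg, _ | ⟨y, r2⟩⟩⟩
      · simp [pvRenderFrom]
      · simp [pvRenderFrom]
      · dsimp only
        by_cases ha : PySem.Chars.strip act0 ≠ []
        · rw [if_pos ha]
          by_cases hsl : PySem.Chars.isIn ['/'] (PySem.Chars.strip act0) = true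
          · simp only [hsl, if_true]
            rcases hq : PySem.Chars.splitMax? (PySem.Chars.strip act0) ['/'] 1 with
              _ | ⟨_ | ⟨al, _ | ⟨fb, _ | ⟨z, r3⟩⟩⟩⟩
            · simp [hstr0, h0, pvFwdEdges, pvFbEdges, pvRenderFrom]
            · simp [hstr0, h0, pvFwdEdges, pvFbEdges, pvRenderFrom]
            · simp [hstr0, h0, pvFwdEdges, pvFbEdges, pvRenderFrom]
            · dsimp only
              by_cases hal : PySem.Chars.strip al ≠ []
              · rw [if_pos hal, pv_foldA_fwd]
                by_cases hfb : PySem.Chars.strip fb ≠ []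
                · rw [if_pos hfb, pv_foldA_fb, pv_renderFrom_append]
                  simp [List.append_assoc]
                  push_cast; ring
                · rw [if_neg hfb]
                  simp only [ne_eq, not_not] at hfb
                  rw [hfb]
                  simp [hstr0, h0, pvFbEdges, pvRenderFrom]
              · rw [if_neg hal]
                simp only [ne_eq, not_not] at hal
                rw [hal]
                by_cases hfb : PySem.Chars.strip fb ≠ []
                · rw [if_pos hfb, pv_foldA_fb]
                  simp [hstr0, h0, pvFwdEdges, pvRenderFrom]
                · rw [if_neg hfb]
                  simp only [ne_eq, not_not] at hfb
                  rw [hfb]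
                  simp [hstr0, h0, pvFwdEdges, pvFbEdges, pvRenderFrom]
            · simp [hstr0, h0, pvFwdEdges, pvFbEdges, pvRenderFrom]
          · simp only [hsl, Bool.false_eq_true, if_false]
            rw [pv_foldA_fwd]
            simp [hstr0, h0, pvFbEdges, pvRenderFrom]
        · rw [if_neg ha]
          simp only [ne_eq, not_not] at ha
          rw [ha]
          simp [hstr0, h0, hsl0, pvFwdEdges, pvFbEdges, pvRenderFrom]
      · simp [pvRenderFrom]
    · simp [pvRenderFrom]
  · simp [hc, pvRenderFrom]

theorem pv_lineB_eq (st : List (List Char) × List (List Char × List Char × List Char × Bool))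
    (line : List Char) :
    pvLineB st line = (st.1 ++ pvSubOf line, st.2 ++ pvEdgesOf line) := by
  have hstr0 : PySem.Chars.strip ([] : List Char) = [] := rfl
  have h0 : PySem.Chars.splitOn [] [','] = [[]] := rfl
  have hsub : (if PySem.Chars.isIn ['['] line && PySem.Chars.isIn [']'] line then
      match PySem.Chars.split? line ['['] with
      | some [parent, children] =>
        let subs := st.1 ++ ["subgraph ".toList ++ PySem.Chars.strip parent]
        let subs := (PySem.Chars.split₀ (PySem.Chars.strip (pvRstripBracket children))).foldl
          (fun a comp => a ++ ["    ".toList ++ comp ++ ['['] ++ comp ++ [']']]) subs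
        (subs ++ ["end".toList], st.2)
      | _ => st
    else st) = (st.1 ++ pvSubOf line, st.2) := by
    unfold pvSubOf
    by_cases h : (PySem.Chars.isIn ['['] line && PySem.Chars.isIn [']'] line) = true
    · simp only [h, if_true]
      rcases hsp : PySem.Chars.split? line ['['] with _ | ⟨_ | ⟨p, _ | ⟨c, _ | ⟨x, r⟩⟩⟩⟩
      · simp
      · simp
      · simp
      · dsimp only
        rw [PySem.List.foldl_append_singleton_eq_map]
        simp [List.append_assoc]
      · simp
    · simp [h]
  unfold pvLineB pvEdgesOf
  rw [hsub]
  by_cases hc : PySem.Chars.isIn [':'] line = true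
  · simp only [hc, if_true]
    rcases hsp : PySem.Chars.splitMax? line [':'] 1 with _ | ⟨_ | ⟨ent, _ | ⟨act0, _ | ⟨x, r⟩⟩⟩⟩
    · simp
    · simp
    · simp
    · dsimp only
      rcases hsq : PySem.Chars.split₀ ent with _ | ⟨s0, _ | ⟨tg, _ | ⟨y, r2⟩⟩⟩
      · simp
      · simp
      · dsimp only
        rw [pv_foldB_fwd, pv_foldB_fb]
        simp [List.append_assoc]
      · simp
    · simp
  · simp [hc]

theorem pv_foldA_sub (lines : List (List Char)) :
    ∀ acc, lines.foldl pvSubLoopA acc = acc ++ lines.flatMap pvSubOf := by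
  induction lines with
  | nil => intro acc; simp
  | cons l ls ih =>
    intro acc
    rw [List.foldl_cons, pv_subLoopA_eq, ih]
    simp [List.append_assoc]

theorem pv_foldA_rel (lines : List (List Char)) :
    ∀ (acc : List (List Char)) (t : Int),
      lines.foldl pvRelLoopA (acc, t)
        = (acc ++ pvRenderFrom t (lines.flatMap pvEdgesOf),
           t + ((lines.flatMap pvEdgesOf).length : Int)) := by
  induction lines with
  | nil => intro acc t; simp [pvRenderFrom]
  | cons l ls ih =>
    intro acc t
    rw [List.foldl_cons, pv_relLoopA_eq, ih, List.flatMap_cons, pv_renderFrom_append]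
    simp [List.append_assoc]
    push_cast; ring

theorem pv_foldB_lines (lines : List (List Char)) :
    ∀ st : List (List Char) × List (List Char × List Char × List Char × Bool),
      lines.foldl pvLineB st
        = (st.1 ++ lines.flatMap pvSubOf, st.2 ++ lines.flatMap pvEdgesOf) := by
  induction lines with
  | nil => intro st; simp
  | cons l ls ih =>
    intro st
    rw [List.foldl_cons, pv_lineB_eq, ih]
    simp [List.append_assoc]

theorem pv_foldB_render (edges : List (List Char × List Char × List Char × Bool)) :
    ∀ (out : List (List Char)) (t : Int),
      edges.foldl pvRenderStep (out, t)
        = (out ++ pvRenderFrom t edges, t + (edges.length : Int)) := by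
  induction edges with
  | nil => intro out t; simp [pvRenderFrom]
  | cons e es ih =>
    intro out t
    rcases e with ⟨s, tg, lbl, fb⟩
    cases fb
    · rw [List.foldl_cons]
      show es.foldl pvRenderStep (out ++ [s ++ "-->|".toList ++ lbl ++ ['|'] ++ tg], t + 1) = _
      rw [ih]
      simp [pvRenderFrom, List.append_assoc]
      push_cast; ring
    · rw [List.foldl_cons]
      show es.foldl pvRenderStep
        (out ++ [s ++ "-->|".toList ++ lbl ++ ['|'] ++ tg]
             ++ ["linkStyle ".toList ++ PySem.Int.toChars t ++ " stroke:#ff0000,color:#ff0000".toList],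
         t + 1) = _
      rw [ih]
      simp [pvRenderFrom, List.append_assoc]
      push_cast; ring

-- ===== VERDICT (by name: the statement is the Claim_ definition above) =====
theorem convert_hcs_to_mermaid_spec : Claim_equal_convert_hcs_to_mermaid := by
  unfold Claim_equal_convert_hcs_to_mermaid
  intro s _ _
  unfold Spec_convert_hcs_to_mermaid convert_hcs_to_mermaid convert_hcs_to_mermaid_alt
  dsimp only
  rw [pv_foldA_sub, pv_foldA_rel, pv_foldB_lines, pv_foldB_render]
  simp [List.append_assoc]
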